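-- pv_equiv track=rewrite | github.com/seamoon76/VLM-reasoning | analyze_attention.py | get_top_left_quadrant_indices
-- ===== SOURCE A (Python) =====
-- def get_top_left_quadrant_indices(grid_size):
--     """Get vision token indices corresponding to top-left quadrant"""
--     indices = []
--     mid_row = grid_size // 2
--     mid_col = grid_size // 2
--
--     for i in range(mid_row):
--         for j in range(mid_col):
--             idx = i * grid_size + j
--             indices.append(idx)
--     return indices
-- ===== SOURCE B (Python) =====
-- def get_top_left_quadrant_indices(grid_size):
--     """Get vision token indices corresponding to top-left quadrant"""
--     if grid_size <= 0:
--         return []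
--     mid = grid_size // 2
--     return [idx for idx in range(mid * grid_size) if idx % grid_size < mid]
-- ===== Notes on version B (the rewrite author's own statement) =====
-- stated objective: alternative
-- what changed: Replaces the nested row/column loops by a single pass over the flat indices 0..mid*grid_size-1, selecting an index exactly when idx % grid_size < mid (with an explicit empty result for non-positive sizes).
import Mathlib
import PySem

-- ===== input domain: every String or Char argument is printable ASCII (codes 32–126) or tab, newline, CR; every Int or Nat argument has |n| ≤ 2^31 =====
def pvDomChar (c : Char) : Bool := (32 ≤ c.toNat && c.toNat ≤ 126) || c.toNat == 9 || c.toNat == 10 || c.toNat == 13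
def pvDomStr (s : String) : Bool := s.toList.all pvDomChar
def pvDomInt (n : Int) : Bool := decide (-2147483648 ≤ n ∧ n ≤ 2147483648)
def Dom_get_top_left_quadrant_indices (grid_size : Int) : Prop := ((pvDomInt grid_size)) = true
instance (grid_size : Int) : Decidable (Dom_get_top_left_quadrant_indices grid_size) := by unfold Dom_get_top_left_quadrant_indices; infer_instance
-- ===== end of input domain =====

-- B replaces the nested row/column loops by one flat pass over range(mid*grid_size)
-- filtering with idx % grid_size < mid (alternative decomposition; not claimed faster).

-- ===== PORT A =====
def get_top_left_quadrant_indices (grid_size : Int) : List Int :=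
  let mid_row := PySem.Int.floordiv grid_size 2
  let mid_col := PySem.Int.floordiv grid_size 2
  (PySem.List.pyRange 0 mid_row 1).foldl (fun indices i =>
    (PySem.List.pyRange 0 mid_col 1).foldl (fun indices j =>
      indices ++ [i * grid_size + j]) indices) []

-- ===== PORT B =====
def get_top_left_quadrant_indices_alt (grid_size : Int) : List Int :=
  if grid_size ≤ 0 then []
  else
    let mid := PySem.Int.floordiv grid_size 2
    (PySem.List.pyRange 0 (mid * grid_size) 1).filter
      (fun idx => decide (PySem.Int.mod idx grid_size < mid))

-- ===== PRECONDITION & SPEC =====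
def Spec_get_top_left_quadrant_indices (grid_size : Int) (out : List Int) : Prop := out = get_top_left_quadrant_indices_alt grid_size
instance (grid_size : Int) (out : List Int) : Decidable (Spec_get_top_left_quadrant_indices grid_size out) := by unfold Spec_get_top_left_quadrant_indices; infer_instance

-- ===== CLAIM (what is proved, stated in full; the proofs are below) =====
def Claim_equal_get_top_left_quadrant_indices : Prop := ∀ (grid_size : Int), Dom_get_top_left_quadrant_indices grid_size → Spec_get_top_left_quadrant_indices grid_size (get_top_left_quadrant_indices grid_size)

-- ===== LEMMAS AND PROOFS =====

-- One block of the flat range, filtered by the quadrant test, is exactly row k of A.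
lemma pv_block (n m : Int) (hn : 0 < n) (hm0 : 0 ≤ m) (hmn : m ≤ n) (k : Int) :
    (PySem.List.pyRange (k*n) ((k+1)*n) 1).filter
        (fun idx => decide (PySem.Int.mod idx n < m)) =
      (PySem.List.pyRange 0 m 1).map (fun j => k * n + j) := by
  have hsplit : PySem.List.pyRange (k*n) ((k+1)*n) 1 =
      PySem.List.pyRange (k*n) (k*n + m) 1 ++ PySem.List.pyRange (k*n + m) ((k+1)*n) 1 := by
    apply PySem.List.pyRange_one_append <;> nlinarith
  have hmod : ∀ x : Int, k*n ≤ x → x < (k+1)*n → PySem.Int.mod x n = x - k*n := by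
    intro x h1 h2
    rw [PySem.Int.mod_eq_emod_of_pos hn]
    have : x = (x - k*n) + n*k := by ring
    rw [this, Int.add_mul_emod_self_left, Int.emod_eq_of_lt (by linarith) (by linarith)]
    ring
  rw [hsplit, List.filter_append]
  have h1 : (PySem.List.pyRange (k*n) (k*n + m) 1).filter
      (fun idx => decide (PySem.Int.mod idx n < m)) = PySem.List.pyRange (k*n) (k*n + m) 1 := by
    apply List.filter_eq_self.mpr
    intro x hx
    rw [PySem.List.mem_pyRange_one] at hx
    simp [hmod x hx.1 (by nlinarith [hx.2])]
    omega
  have h2 : (PySem.List.pyRange (k*n + m) ((k+1)*n) 1).filter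
      (fun idx => decide (PySem.Int.mod idx n < m)) = [] := by
    apply List.filter_eq_nil_iff.mpr
    intro x hx
    rw [PySem.List.mem_pyRange_one] at hx
    simp [hmod x (by linarith [hx.1]) hx.2]
    omega
  rw [h1, h2, List.append_nil]
  rw [PySem.List.pyRange_one, PySem.List.pyRange_one]
  simp [Function.comp, add_comm]

-- The filtered flat range over k rows equals the flatMap over the first k rows.
lemma pv_rows (n m : Int) (hn : 0 < n) (hm0 : 0 ≤ m) (hmn : m ≤ n) : ∀ (k : Nat),
    (PySem.List.pyRange 0 ((k : Int)*n) 1).filter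
        (fun idx => decide (PySem.Int.mod idx n < m)) =
      (PySem.List.pyRange 0 (k : Int) 1).flatMap
        (fun i => (PySem.List.pyRange 0 m 1).map (fun j => i * n + j)) := by
  intro k
  induction k with
  | zero => simp [PySem.List.pyRange_one_eq_nil]
  | succ k ih =>
    have hkn : (0:Int) ≤ (k:Int)*n := by positivity
    have hsplit : PySem.List.pyRange 0 (((k+1 : Nat) : Int)*n) 1 =
        PySem.List.pyRange 0 ((k:Int)*n) 1 ++ PySem.List.pyRange ((k:Int)*n) (((k:Int)+1)*n) 1 := by
      push_cast
      exact PySem.List.pyRange_one_append _ _ _ hkn (by nlinarith)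
    have hsucc : PySem.List.pyRange 0 ((k+1 : Nat) : Int) 1 =
        PySem.List.pyRange 0 (k : Int) 1 ++ [(k : Int)] := by
      push_cast
      exact PySem.List.pyRange_one_succ_right (by positivity)
    rw [hsplit, List.filter_append, ih, pv_block n m hn hm0 hmn _,
        hsucc, List.flatMap_append]
    simp

-- ===== VERDICT (by name: the statement is the Claim_ definition above) =====
theorem get_top_left_quadrant_indices_spec : Claim_equal_get_top_left_quadrant_indices := by
  intro n _
  unfold Spec_get_top_left_quadrant_indices get_top_left_quadrant_indices get_top_left_quadrant_indices_alt
  dsimp only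
  by_cases hn : n ≤ 0
  · have hm : PySem.Int.floordiv n 2 ≤ 0 := by
      rw [PySem.Int.floordiv_eq_ediv_of_pos (b := 2) (by norm_num)]; omega
    rw [if_pos hn, PySem.List.pyRange_one_eq_nil hm]
    simp
  · replace hn : 0 < n := by omega
    have hm : PySem.Int.floordiv n 2 = n / 2 :=
      PySem.Int.floordiv_eq_ediv_of_pos (b := 2) (by norm_num)
    set m := PySem.Int.floordiv n 2 with hmdef
    have hm0 : 0 ≤ m := by omega
    have hmn : m ≤ n := by omega
    have hcast : ((m.toNat : Int)) = m := Int.toNat_of_nonneg hm0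
    have := pv_rows n m hn hm0 hmn m.toNat
    rw [hcast] at this
    rw [if_neg (by omega), this]
    -- A's nested foldl is the flatMap over the rows
    rw [show (fun (indices : List Int) (i : Int) =>
          (PySem.List.pyRange 0 m 1).foldl (fun indices j => indices ++ [i * n + j]) indices)
        = (fun (indices : List Int) (i : Int) =>
            indices ++ (PySem.List.pyRange 0 m 1).map (fun j => i * n + j)) from
      funext fun acc => funext fun i => PySem.List.foldl_append_singleton_eq_map _ _ _]
    rw [PySem.List.foldl_append_eq_flatMap]
    simp
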